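-- pv_equiv track=rewrite | github.com/ShotaArima/math_python_lib | src/pythonfile/my_set.py | intersection_set
-- ===== SOURCE A (Python) =====
-- def make_set(arrs):
--     results = []
--     if arrs == []:
--         return results
--     results.append(arrs[0])
--     for arr in arrs:
--         ans = True
--         for result in results:
--             if arr == result:
--                 ans = False
--         if ans :
--             results.append(arr)
--     results = sorted(results)
--     return results
--
-- def intersection_set(arrs1, arrs2):
--     new_arrs1 = make_set(arrs1)
--     new_arrs2 = make_set(arrs2)
--     results = []
--     for new_arr1 in new_arrs1:
--         for new_arr2 in new_arrs2:
--             if new_arr1 == new_arr2: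
--                 results.append(new_arr2)
--     return results
-- ===== SOURCE B (Python) =====
-- def _sorted_unique(arrs):
--     s = sorted(arrs)
--     out = []
--     for x in s:
--         if not out or out[-1] != x:
--             out.append(x)
--     return out
--
-- def intersection_set(arrs1, arrs2):
--     a = _sorted_unique(arrs1)
--     b = _sorted_unique(arrs2)
--     res = []
--     i = j = 0
--     while i < len(a) and j < len(b):
--         if a[i] < b[j]:
--             i += 1
--         elif a[i] > b[j]:
--             j += 1
--         else:
--             res.append(a[i])
--             i += 1
--             j += 1
--     return res
-- ===== Notes on version B (the rewrite author's own statement) =====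
-- stated objective: faster
-- what changed: Replaces A's quadratic membership-scan dedup and quadratic nested matching loop with sort + one-pass adjacent dedup + a linear two-pointer merge of the two sorted unique lists.
import Mathlib
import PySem

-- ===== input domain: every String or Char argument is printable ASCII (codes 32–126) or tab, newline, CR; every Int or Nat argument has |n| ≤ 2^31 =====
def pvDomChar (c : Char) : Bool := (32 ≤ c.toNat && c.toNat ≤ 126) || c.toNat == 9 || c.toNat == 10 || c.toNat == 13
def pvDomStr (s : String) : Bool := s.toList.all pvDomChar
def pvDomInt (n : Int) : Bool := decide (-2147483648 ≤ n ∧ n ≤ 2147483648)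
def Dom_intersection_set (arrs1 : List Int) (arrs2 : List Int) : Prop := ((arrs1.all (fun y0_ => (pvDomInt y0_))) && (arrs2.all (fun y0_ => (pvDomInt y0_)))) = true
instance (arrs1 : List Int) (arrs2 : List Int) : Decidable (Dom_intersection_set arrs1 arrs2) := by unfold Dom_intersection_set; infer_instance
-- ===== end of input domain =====

-- B replaces A's quadratic membership-scan dedup and quadratic nested matching with
-- sort + adjacent dedup + a two-pointer merge (objective: faster).

-- ===== PORT A =====
def make_set (arrs : List Int) : List Int :=
  match arrs with
  | [] => []
  | a0 :: _ =>
    -- results = [arrs[0]]; for arr in arrs: inner scan for equality; conditional append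
    let results :=
      arrs.foldl (fun results arr =>
        let ans := results.foldl (fun ans result => if arr == result then false else ans) true
        if ans then results ++ [arr] else results) [a0]
    PySem.List.sorted results (fun x => x) false

def intersection_set (arrs1 : List Int) (arrs2 : List Int) : List Int :=
  let new_arrs1 := make_set arrs1
  let new_arrs2 := make_set arrs2
  new_arrs1.foldl (fun results new_arr1 =>
    new_arrs2.foldl (fun results new_arr2 =>
      if new_arr1 == new_arr2 then results ++ [new_arr2] else results) results) []

-- ===== PORT B =====
def pvSortedUnique (arrs : List Int) : List Int :=
  (PySem.List.sorted arrs (fun x => x) false).foldl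
    (fun out x => if out = [] ∨ out.getLast? ≠ some x then out ++ [x] else out) []

-- two-pointer merge over the two sorted unique lists (Source B's while loop, as structural recursion)
def pvMerge : List Int → List Int → List Int
  | [], _ => []
  | _ :: _, [] => []
  | a :: as_, b :: bs =>
    if a < b then pvMerge as_ (b :: bs)
    else if a > b then pvMerge (a :: as_) bs
    else a :: pvMerge as_ bs
termination_by as_ bs => as_.length + bs.length

def intersection_set_alt (arrs1 : List Int) (arrs2 : List Int) : List Int :=
  pvMerge (pvSortedUnique arrs1) (pvSortedUnique arrs2)

-- ===== PRECONDITION & SPEC =====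
def Spec_intersection_set (arrs1 : List Int) (arrs2 : List Int) (out : List Int) : Prop := out = intersection_set_alt arrs1 arrs2
instance (arrs1 : List Int) (arrs2 : List Int) (out : List Int) : Decidable (Spec_intersection_set arrs1 arrs2 out) := by unfold Spec_intersection_set; infer_instance

-- ===== CLAIM (what is proved, stated in full; the proofs are below) =====
def Claim_equal_intersection_set : Prop := ∀ (arrs1 : List Int) (arrs2 : List Int), Dom_intersection_set arrs1 arrs2 → Spec_intersection_set arrs1 arrs2 (intersection_set arrs1 arrs2)

-- ===== LEMMAS AND PROOFS =====

-- A's inner scan computes "arr not yet in results"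
theorem pvScan_eq (arr : Int) (l : List Int) (b : Bool) :
    l.foldl (fun ans result => if arr == result then false else ans) b = (b && !l.contains arr) := by
  induction l generalizing b with
  | nil => simp
  | cons r t ih =>
    simp only [List.foldl_cons, ih]
    by_cases h : arr = r <;> simp [h]

-- A's dedup loop is the plain "append if not member" fold
theorem pvDedupFold_eq (l : List Int) (acc : List Int) :
    l.foldl (fun results arr =>
        let ans := results.foldl (fun ans result => if arr == result then false else ans) true
        if ans then results ++ [arr] else results) acc =
    l.foldl (fun results arr => if arr ∈ results then results else results ++ [arr]) acc := by
  induction l generalizing acc with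
  | nil => rfl
  | cons x t ih =>
    rw [List.foldl_cons, List.foldl_cons, ih]
    congr 1
    simp only [pvScan_eq, Bool.true_and]
    by_cases hx : x ∈ acc <;> simp [hx]

-- the "append if not member" fold: nodup, and membership = acc ∪ processed list
theorem pvDedupLoop_spec (l : List Int) (acc : List Int) (hnd : acc.Nodup) :
    (l.foldl (fun results arr => if arr ∈ results then results else results ++ [arr]) acc).Nodup ∧
    ∀ z, z ∈ (l.foldl (fun results arr => if arr ∈ results then results else results ++ [arr]) acc) ↔ z ∈ acc ∨ z ∈ l := by
  induction l generalizing acc with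
  | nil => simp [hnd]
  | cons x t ih =>
    rw [List.foldl_cons]
    by_cases hx : x ∈ acc
    · rw [if_pos hx]
      obtain ⟨h1, h2⟩ := ih acc hnd
      refine ⟨h1, fun z => ?_⟩
      rw [h2]
      simp only [List.mem_cons]
      constructor
      · tauto
      · rintro (h | rfl | h)
        · exact Or.inl h
        · exact Or.inl hx
        · exact Or.inr h
    · rw [if_neg hx]
      obtain ⟨h1, h2⟩ := ih (acc ++ [x]) (by simp [List.nodup_append, hnd]; exact fun a ha h => hx (h ▸ ha))
      refine ⟨h1, fun z => ?_⟩
      rw [h2]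
      simp only [List.mem_append, List.mem_cons]
      tauto

-- B's adjacent-dedup fold: strictly increasing, membership = acc ∪ list
theorem pvSU_loop_spec (l : List Int) (hl : l.Pairwise (· ≤ ·)) (acc : List Int)
    (hs : acc.Pairwise (· < ·)) (hle : ∀ a ∈ acc, ∀ y ∈ l, a ≤ y) :
    (l.foldl (fun out x => if out = [] ∨ out.getLast? ≠ some x then out ++ [x] else out) acc).Pairwise (· < ·) ∧
    ∀ z, z ∈ (l.foldl (fun out x => if out = [] ∨ out.getLast? ≠ some x then out ++ [x] else out) acc) ↔ z ∈ acc ∨ z ∈ l := by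
  induction l generalizing acc with
  | nil => simp [hs]
  | cons x t ih =>
    have hxt : ∀ y ∈ t, x ≤ y := fun y hy => (List.pairwise_cons.1 hl).1 y hy
    have ht : t.Pairwise (· ≤ ·) := (List.pairwise_cons.1 hl).2
    simp only [List.foldl_cons]
    by_cases hcond : acc = [] ∨ acc.getLast? ≠ some x
    · rw [if_pos hcond]
      have hax : ∀ a ∈ acc, a < x := by
        intro a ha
        have hax' : a ≤ x := hle a ha x (by simp)
        rcases lt_or_eq_of_le hax' with h | h
        · exact h
        · exfalso
          subst h
          rcases hcond with h0 | hlast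
          · rw [h0] at ha; simp at ha
          · apply hlast
            cases hgl : acc.getLast? with
            | none =>
              rw [List.getLast?_eq_none_iff] at hgl
              rw [hgl] at ha; simp at ha
            | some g =>
              have hgm : g ∈ acc := List.mem_of_getLast? hgl
              have hga : g ≤ a := hle g hgm a (by simp)
              have hag : a ≤ g := by
                rcases List.getLast?_eq_some_iff.1 hgl with ⟨ys, hys⟩
                rw [hys] at ha hs
                rcases List.mem_append.1 ha with h | h
                · exact le_of_lt ((List.pairwise_append.1 hs).2.2 a h g (by simp))
                · simp at h; omega
              have : g = a := by omega
              rw [this]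
      have hs' : (acc ++ [x]).Pairwise (· < ·) := by
        rw [List.pairwise_append]
        exact ⟨hs, by simp, by simpa using hax⟩
      have hle' : ∀ a ∈ acc ++ [x], ∀ y ∈ t, a ≤ y := by
        intro a ha y hy
        rcases List.mem_append.1 ha with h | h
        · exact hle a h y (by simp [hy])
        · simp at h; subst h; exact hxt y hy
      obtain ⟨h1, h2⟩ := ih ht (acc ++ [x]) hs' hle'
      refine ⟨h1, fun z => ?_⟩
      rw [h2]
      simp only [List.mem_append, List.mem_cons]
      tauto
    · rw [if_neg hcond]
      rw [not_or, not_not] at hcond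
      obtain ⟨hne, hlast⟩ := hcond
      have hxa : x ∈ acc := List.mem_of_getLast? hlast
      have hle' : ∀ a ∈ acc, ∀ y ∈ t, a ≤ y := fun a ha y hy => hle a ha y (by simp [hy])
      obtain ⟨h1, h2⟩ := ih ht acc hs hle'
      refine ⟨h1, fun z => ?_⟩
      rw [h2]
      simp only [List.mem_cons]
      constructor
      · tauto
      · rintro (h | rfl | h)
        · exact Or.inl h
        · exact Or.inl hxa
        · exact Or.inr h

theorem pvSortedUnique_spec (arrs : List Int) :
    (pvSortedUnique arrs).Pairwise (· < ·) ∧ ∀ z, z ∈ pvSortedUnique arrs ↔ z ∈ arrs := by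
  unfold pvSortedUnique
  obtain ⟨h1, h2⟩ := pvSU_loop_spec (PySem.List.sorted arrs (fun x => x) false)
    (PySem.List.sorted_pairwise arrs (fun x => x)) [] (by simp) (by simp)
  refine ⟨h1, fun z => ?_⟩
  rw [h2]
  simp [PySem.List.mem_sorted]

-- make_set equals B's sortedUnique
theorem pvMakeSet_eq (arrs : List Int) : make_set arrs = pvSortedUnique arrs := by
  match h : arrs with
  | [] => simp [make_set, pvSortedUnique, PySem.List.sorted]
  | a0 :: rest =>
    unfold make_set
    simp only [pvDedupFold_eq]
    obtain ⟨hnd, hmem⟩ := pvDedupLoop_spec (a0 :: rest) [a0] (by simp)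
    obtain ⟨hsu, hsumem⟩ := pvSortedUnique_spec (a0 :: rest)
    apply PySem.List.sorted_eq_of_perm_of_pairwise_lt
    · rw [List.perm_ext_iff_of_nodup (hsu.imp ne_of_lt) hnd]
      intro z
      rw [hsumem, hmem]
      constructor
      · intro h; right; exact h
      · rintro (h | h)
        · simp at h; simp [h]
        · exact h
    · exact hsu

-- filter on a nodup list by equality to x
theorem pvFilter_eq_of_nodup (x : Int) (l : List Int) (h : l.Nodup) :
    l.filter (fun y => x == y) = if x ∈ l then [x] else [] := by
  induction l with
  | nil => simp
  | cons a t ih =>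
    have hnd : t.Nodup := (List.nodup_cons.1 h).2
    have hna : a ∉ t := (List.nodup_cons.1 h).1
    by_cases hxa : x = a
    · subst hxa
      have hft : List.filter (fun y => x == y) t = [] :=
        List.filter_eq_nil_iff.2 (fun y hy => by
          simp only [beq_iff_eq]; rintro rfl; exact hna hy)
      simp [hft]
    · rw [List.filter_cons, if_neg (by simp [hxa]), ih hnd]
      by_cases hxt : x ∈ t
      · rw [if_pos hxt, if_pos (by simp [hxt])]
      · rw [if_neg hxt, if_neg (by simp [hxa, hxt])]

-- A's nested loops = filter by membership
theorem pvA_eq_filter (ms1 ms2 : List Int) (h2 : ms2.Nodup) :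
    ms1.foldl (fun results new_arr1 =>
      ms2.foldl (fun results new_arr2 =>
        if new_arr1 == new_arr2 then results ++ [new_arr2] else results) results) [] =
    ms1.filter (fun x => decide (x ∈ ms2)) := by
  have hinner : ∀ (x : Int) (acc : List Int),
      ms2.foldl (fun results new_arr2 =>
        if x == new_arr2 then results ++ [new_arr2] else results) acc =
      acc ++ (if x ∈ ms2 then [x] else []) := by
    intro x acc
    rw [PySem.List.foldl_append_if (fun y => x == y) (fun y => y) ms2 acc,
        pvFilter_eq_of_nodup x ms2 h2]
    by_cases hx : x ∈ ms2 <;> simp [hx]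
  have hfe : (fun (results : List Int) (new_arr1 : Int) =>
      ms2.foldl (fun results new_arr2 =>
        if new_arr1 == new_arr2 then results ++ [new_arr2] else results) results) =
      fun results x => results ++ (if x ∈ ms2 then [x] else []) := by
    funext results x; exact hinner x results
  rw [hfe, PySem.List.foldl_append_eq_flatMap]
  induction ms1 with
  | nil => simp
  | cons a t ih =>
    simp only [List.flatMap_cons, List.filter_cons] at *
    by_cases h : a ∈ ms2 <;> simp [h, ← ih]

-- B's two-pointer merge on strictly increasing lists = filter by membership
theorem pvMerge_eq_filter (as_ bs : List Int)
    (ha : as_.Pairwise (· < ·)) (hb : bs.Pairwise (· < ·)) :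
    pvMerge as_ bs = as_.filter (fun x => decide (x ∈ bs)) := by
  induction as_, bs using pvMerge.induct with
  | case1 bs => simp [pvMerge]
  | case2 a t => simp [pvMerge]
  | case3 a t b u hab ih =>
    rw [pvMerge, if_pos hab]
    have ht := (List.pairwise_cons.1 ha).2
    rw [ih ht hb]
    have hnab : a ∉ b :: u := by
      intro h
      rcases List.mem_cons.1 h with h | h
      · omega
      · have := (List.pairwise_cons.1 hb).1 a h; omega
    rw [List.filter_cons, if_neg (by simp [hnab])]
  | case4 a t b u hab hba ih =>
    rw [pvMerge, if_neg hab, if_pos hba]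
    have hu := (List.pairwise_cons.1 hb).2
    rw [ih ha hu]
    apply List.filter_congr
    intro x hx
    have hxb : b < x := by
      rcases List.mem_cons.1 hx with h | h
      · omega
      · have := (List.pairwise_cons.1 ha).1 x h; omega
    simp only [decide_eq_decide, List.mem_cons]
    constructor
    · intro hmem; exact Or.inr hmem
    · rintro (rfl | hmem)
      · exfalso; omega
      · exact hmem
  | case5 a t b u hab hba ih =>
    have hEq : a = b := by omega
    subst hEq
    rw [pvMerge, if_neg hab, if_neg hba]
    have ht := (List.pairwise_cons.1 ha).2
    have hu := (List.pairwise_cons.1 hb).2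
    rw [ih ht hu]
    have h1 : a ∈ a :: u := by simp
    rw [List.filter_cons, if_pos (by simp)]
    congr 1
    apply List.filter_congr
    intro x hx
    have hax : a < x := (List.pairwise_cons.1 ha).1 x hx
    simp only [decide_eq_decide, List.mem_cons]
    constructor
    · intro hmem; exact Or.inr hmem
    · rintro (rfl | hmem)
      · exfalso; omega
      · exact hmem

-- ===== VERDICT (by name: the statement is the Claim_ definition above) =====
theorem intersection_set_spec : Claim_equal_intersection_set := by
  intro arrs1 arrs2 _
  unfold Spec_intersection_set intersection_set intersection_set_alt
  simp only [pvMakeSet_eq]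
  obtain ⟨hs1, _⟩ := pvSortedUnique_spec arrs1
  obtain ⟨hs2, _⟩ := pvSortedUnique_spec arrs2
  rw [pvA_eq_filter _ _ (hs2.imp ne_of_lt), pvMerge_eq_filter _ _ hs1 hs2]
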